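-- pv_equiv track=rewrite | github.com/pypi-data/pypi-mirror-377 | packages/pcsuite/pcsuite-1.0.7-py3-none-any.whl/pcsuite/security/firewall.py | _parse_allprofiles
-- ===== SOURCE A (Python) =====
-- from typing import Dict, Any, List
--
-- def _parse_allprofiles(output: str) -> Dict[str, str]:
--     states: Dict[str, str] = {"Domain": "unknown", "Private": "unknown", "Public": "unknown"}
--     current = None
--     for raw in (output or "").splitlines():
--         line = raw.strip()
--         if not line:
--             continue
--         if line.lower().startswith("domain profile"):
--             current = "Domain"
--         elif line.lower().startswith("private profile"):
--             current = "Private"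
--         elif line.lower().startswith("public profile"):
--             current = "Public"
--         elif line.startswith("State") and current:
--             # Example: State                                 ON
--             parts = line.split()
--             if parts:
--                 states[current] = parts[-1].upper()
--     return states
-- ===== SOURCE B (Python) =====
-- def _prof_of(line):
--     low = line.lower()
--     if low.startswith("domain profile"):
--         return "Domain"
--     if low.startswith("private profile"):
--         return "Private"
--     if low.startswith("public profile"):
--         return "Public"
--     return None
--
-- def _chunks(ls):
--     # Recursively split the line list into (profile, section) chunks: each chunk
--     # is a profile header's name paired with the lines up to the next header.
--     if not ls:
--         return []
--     head, rest = ls[0], ls[1:]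
--     p = _prof_of(head)
--     if p is None:
--         return _chunks(rest)
--     j = next((k for k, m in enumerate(rest) if _prof_of(m) is not None), None)
--     if j is None:
--         return [(p, rest)]
--     return [(p, rest[:j])] + _chunks(rest[j:])
--
-- def _parse_allprofiles(output: str):
--     lines = [l for l in (s.strip() for s in (output or "").splitlines()) if l]
--     states = {"Domain": "unknown", "Private": "unknown", "Public": "unknown"}
--     for p, body in _chunks(lines):
--         vals = [l.split()[-1].upper() for l in body if l.startswith("State")]
--         if vals:
--             states[p] = vals[-1]
--     return states
-- ===== Notes on version B (the rewrite author's own statement) =====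
-- stated objective: alternative
-- what changed: B replaces A's single stateful scan with a recursive divide step: it splits the (stripped, nonblank) line list into (profile, section) chunks at the header lines and then, per chunk, extracts the State tokens with a comprehension and keeps the last, instead of threading a mutable current-profile variable and updating the dict inline.
import Mathlib
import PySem

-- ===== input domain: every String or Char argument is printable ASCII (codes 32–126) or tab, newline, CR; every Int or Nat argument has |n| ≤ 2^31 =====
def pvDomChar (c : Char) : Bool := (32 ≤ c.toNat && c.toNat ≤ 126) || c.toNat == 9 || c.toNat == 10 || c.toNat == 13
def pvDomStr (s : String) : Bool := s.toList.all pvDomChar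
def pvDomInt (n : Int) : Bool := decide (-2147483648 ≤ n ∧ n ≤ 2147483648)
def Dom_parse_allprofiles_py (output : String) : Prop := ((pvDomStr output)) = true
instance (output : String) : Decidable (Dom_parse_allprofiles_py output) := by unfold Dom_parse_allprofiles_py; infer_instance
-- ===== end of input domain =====

-- B splits the line list into (profile, section) chunks by a recursive divide at header lines and
-- extracts each section's last "State" token, instead of A's single stateful scan; objective: alternative, same cost.


-- ===== PORT A =====
-- states = {"Domain": "unknown", "Private": "unknown", "Public": "unknown"}
def pvInitStates : PySem.Dict String String :=
  PySem.Dict.mk [("Domain", "unknown"), ("Private", "unknown"), ("Public", "unknown")]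

-- one iteration of A's loop; loop state = (current, states)
def pvStepA (s : Option String × PySem.Dict String String) (raw : String) :
    Option String × PySem.Dict String String :=
  let line := PySem.Str.strip raw
  if line = "" then s                   -- if not line: continue
  else if PySem.Str.startswith (PySem.Str.lower line) "domain profile" then (some "Domain", s.2)
  else if PySem.Str.startswith (PySem.Str.lower line) "private profile" then (some "Private", s.2)
  else if PySem.Str.startswith (PySem.Str.lower line) "public profile" then (some "Public", s.2)
  else if PySem.Str.startswith line "State" then
    match s.1 with                      -- "and current"
    | some c =>
        let parts := PySem.Str.split₀ line
        if parts.isEmpty then s         -- "if parts:"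
        else (s.1, s.2.insert c (PySem.Str.upper (PySem.List.pyGetD parts (-1) "")))
    | none => s
  else s

def parse_allprofiles_py (output : String) : List (String × String) :=
  ((PySem.Str.splitlines output).foldl pvStepA (none, pvInitStates)).2.items

-- ===== PORT B =====
-- _prof_of
def pvProfOf (line : String) : Option String :=
  let low := PySem.Str.lower line
  if PySem.Str.startswith low "domain profile" then some "Domain"
  else if PySem.Str.startswith low "private profile" then some "Private"
  else if PySem.Str.startswith low "public profile" then some "Public"
  else none

-- _chunks: recursively split into (profile, section) chunks; 'next(... enumerate ...)' is
-- findIdx?, and rest[:j]/rest[j:] with this in-range natural j are take/drop (exact).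
def pvChunks : List String → List (String × List String)
  | [] => []
  | head :: rest =>
    match pvProfOf head with
    | none => pvChunks rest
    | some p =>
      match rest.findIdx? (fun m => (pvProfOf m).isSome) with
      | none => [(p, rest)]
      | some j => (p, rest.take j) :: pvChunks (rest.drop j)
termination_by ls => ls.length
decreasing_by all_goals simp [List.length_drop]

-- loop body of B: vals = [l.split()[-1].upper() for l in body if l.startswith("State")]
def pvExtract (st : PySem.Dict String String) (c : String × List String) :
    PySem.Dict String String :=
  let vals := (c.2.filter (fun l => PySem.Str.startswith l "State")).map
      (fun l => PySem.Str.upper (PySem.List.pyGetD (PySem.Str.split₀ l) (-1) ""))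
  if vals.isEmpty then st else st.insert c.1 (PySem.List.pyGetD vals (-1) "")

def parse_allprofiles_py_alt (output : String) : List (String × String) :=
  let lines := ((PySem.Str.splitlines output).map PySem.Str.strip).filter (fun l => l != "")
  ((pvChunks lines).foldl pvExtract (PySem.Dict.mk
    [("Domain", "unknown"), ("Private", "unknown"), ("Public", "unknown")])).items

-- ===== PRECONDITION & SPEC =====
def Spec_parse_allprofiles_py (output : String) (out : List (String × String)) : Prop := out = parse_allprofiles_py_alt output
instance (output : String) (out : List (String × String)) : Decidable (Spec_parse_allprofiles_py output out) := by unfold Spec_parse_allprofiles_py; infer_instance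

-- ===== CLAIM (what is proved, stated in full; the proofs are below) =====
def Claim_equal_parse_allprofiles_py : Prop := ∀ (output : String), Dom_parse_allprofiles_py output → Spec_parse_allprofiles_py output (parse_allprofiles_py output)

-- ===== LEMMAS AND PROOFS =====

-- A's step on an already-stripped nonblank line
def pvStep' (s : Option String × PySem.Dict String String) (line : String) :
    Option String × PySem.Dict String String :=
  if PySem.Str.startswith (PySem.Str.lower line) "domain profile" then (some "Domain", s.2)
  else if PySem.Str.startswith (PySem.Str.lower line) "private profile" then (some "Private", s.2)
  else if PySem.Str.startswith (PySem.Str.lower line) "public profile" then (some "Public", s.2)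
  else if PySem.Str.startswith line "State" then
    match s.1 with
    | some c =>
        let parts := PySem.Str.split₀ line
        if parts.isEmpty then s
        else (s.1, s.2.insert c (PySem.Str.upper (PySem.List.pyGetD parts (-1) "")))
    | none => s
  else s

lemma pv_stepA_eq (s : Option String × PySem.Dict String String) (raw : String) :
    pvStepA s raw = if PySem.Str.strip raw = "" then s else pvStep' s (PySem.Str.strip raw) := rfl

lemma pv_foldA_filter (raws : List String) :
    ∀ s, raws.foldl pvStepA s = ((raws.map PySem.Str.strip).filter (fun l => l != "")).foldl pvStep' s := by
  induction raws with
  | nil => intro s; rfl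
  | cons raw rest ih =>
    intro s
    by_cases hb : PySem.Str.strip raw = "" <;>
      simp [pv_stepA_eq, hb, ih]

-- section body / remainder after the next header (proof-side description of _chunks)
def pvBody : List String → List String
  | [] => []
  | l :: ls => match pvProfOf l with
    | some _ => []
    | none => l :: pvBody ls

def pvAfter : List String → List String
  | [] => []
  | l :: ls => match pvProfOf l with
    | some _ => l :: ls
    | none => pvAfter ls

lemma pv_body_after_none (ls : List String)
    (h : ls.findIdx? (fun m => (pvProfOf m).isSome) = none) :
    pvBody ls = ls ∧ pvAfter ls = [] := by
  induction ls with
  | nil => exact ⟨rfl, rfl⟩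
  | cons l ls ih =>
    rw [List.findIdx?_cons] at h
    by_cases hp : (pvProfOf l).isSome
    · simp [hp] at h
    · simp only [hp, Bool.false_eq_true, ite_false, Option.map_eq_none_iff] at h
      obtain ⟨h1, h2⟩ := ih h
      cases hpo : pvProfOf l with
      | some p => simp [hpo] at hp
      | none => simp [pvBody, pvAfter, hpo, h1, h2]

lemma pv_body_after_some (ls : List String) : ∀ j,
    ls.findIdx? (fun m => (pvProfOf m).isSome) = some j →
    pvBody ls = ls.take j ∧ pvAfter ls = ls.drop j := by
  induction ls with
  | nil => intro j h; simp [List.findIdx?_nil] at h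
  | cons l ls ih =>
    intro j h
    rw [List.findIdx?_cons] at h
    by_cases hp : (pvProfOf l).isSome
    · simp only [hp, ite_true, Option.some.injEq] at h
      cases hpo : pvProfOf l with
      | none => simp [hpo] at hp
      | some p => subst h; simp [pvBody, pvAfter, hpo]
    · simp only [hp, Bool.false_eq_true, ite_false, Option.map_eq_some_iff] at h
      obtain ⟨j', hj', rfl⟩ := h
      obtain ⟨h1, h2⟩ := ih j' hj'
      cases hpo : pvProfOf l with
      | some p => simp [hpo] at hp
      | none => simp [pvBody, pvAfter, hpo, h1, h2]

lemma pv_chunks_cons_hdr (l : String) (ls : List String) (p : String)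
    (h : pvProfOf l = some p) :
    pvChunks (l :: ls) = (p, pvBody ls) :: pvChunks (pvAfter ls) := by
  rw [pvChunks]
  rw [h]
  cases hf : ls.findIdx? (fun m => (pvProfOf m).isSome) with
  | none =>
    obtain ⟨h1, h2⟩ := pv_body_after_none ls hf
    simp [h1, h2, pvChunks]
  | some j =>
    obtain ⟨h1, h2⟩ := pv_body_after_some ls j hf
    simp [h1, h2]

lemma pv_chunks_cons_nohdr (l : String) (ls : List String) (h : pvProfOf l = none) :
    pvChunks (l :: ls) = pvChunks ls := by
  rw [pvChunks, h]

-- split() of a line starting with "State" is nonempty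
lemma pv_go_ne_nil (s : List Char) : ∀ (cur : List Char) (acc : List (List Char)),
    cur ≠ [] ∨ acc ≠ [] → PySem.Chars.split₀.go s cur acc ≠ [] := by
  induction s with
  | nil =>
    intro cur acc h
    simp only [PySem.Chars.split₀.go]
    split_ifs with hc
    · simp only [List.isEmpty_iff] at hc
      rcases h with h | h
      · exact absurd hc h
      · simpa using h
    · simp
  | cons c rest ih =>
    intro cur acc h
    rw [show PySem.Chars.split₀.go (c :: rest) cur acc =
      (if PySem.Chars.isspace c = true then
        if cur.isEmpty = true then PySem.Chars.split₀.go rest [] acc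
        else PySem.Chars.split₀.go rest [] (cur.reverse :: acc)
      else PySem.Chars.split₀.go rest (c :: cur) acc) from rfl]
    split_ifs with hs hc
    · simp only [List.isEmpty_iff] at hc
      subst hc
      rcases h with h | h
      · exact absurd rfl h
      · exact ih [] acc (Or.inr h)
    · exact ih [] (cur.reverse :: acc) (Or.inr (by simp))
    · exact ih (c :: cur) acc (Or.inl (by simp))

lemma pv_split_ne_nil (l : String) (h : PySem.Str.startswith l "State" = true) :
    (PySem.Str.split₀ l).isEmpty = false := by
  have h2 : PySem.Chars.startswith l.toList "State".toList = true := by simpa using h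
  rw [PySem.Chars.startswith_iff] at h2
  obtain ⟨t, ht⟩ := h2
  have hne : PySem.Chars.split₀ l.toList ≠ [] := by
    rw [← ht]
    have : PySem.Chars.split₀ ("State".toList ++ t) =
        PySem.Chars.split₀.go t ['e', 't', 'a', 't', 'S'] [] := rfl
    rw [this]
    exact pv_go_ne_nil t _ _ (Or.inl (by simp))
  simp only [PySem.Str.split₀, List.isEmpty_eq_false_iff, ne_eq, List.map_eq_nil_iff]
  exact hne

-- consuming one "State" line of a section = doing its insert first
lemma pv_extract_state (st : PySem.Dict String String) (c l : String) (b : List String)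
    (h : PySem.Str.startswith l "State" = true) :
    pvExtract st (c, l :: b) =
      pvExtract (st.insert c (PySem.Str.upper (PySem.List.pyGetD (PySem.Str.split₀ l) (-1) ""))) (c, b) := by
  unfold pvExtract
  simp only [List.filter_cons, h, if_true, List.map_cons]
  set tok := PySem.Str.upper (PySem.List.pyGetD (PySem.Str.split₀ l) (-1) "") with htok
  set vals := (b.filter (fun l => PySem.Str.startswith l "State")).map
      (fun l => PySem.Str.upper (PySem.List.pyGetD (PySem.Str.split₀ l) (-1) "")) with hvals
  cases hv : vals with
  | nil =>
    simp only [List.isEmpty_cons, List.isEmpty_nil, Bool.false_eq_true, if_false, if_true]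
    rw [PySem.List.pyGetD_neg_one [tok] "" (by simp)]
    simp
  | cons v vs =>
    have hne : v :: vs ≠ [] := by simp
    have hne' : (tok :: v :: vs) ≠ [] := by simp
    simp only [List.isEmpty_cons, Bool.false_eq_true, if_false]
    rw [PySem.List.pyGetD_neg_one (tok :: v :: vs) "" hne',
        PySem.List.pyGetD_neg_one (v :: vs) "" hne,
        List.getLast_cons hne, PySem.Dict.insert_insert_self]

lemma pv_extract_skip (st : PySem.Dict String String) (c l : String) (b : List String)
    (h : PySem.Str.startswith l "State" = false) :
    pvExtract st (c, l :: b) = pvExtract st (c, b) := by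
  unfold pvExtract
  simp only [List.filter_cons, h, Bool.false_eq_true, if_false]

lemma pv_extract_nil (st : PySem.Dict String String) (c : String) :
    pvExtract st (c, []) = st := by
  simp [pvExtract]

-- main invariant, inside a section for profile c
lemma pv_main1 (ls : List String) : ∀ (c : String) (st : PySem.Dict String String),
    (ls.foldl pvStep' (some c, st)).2 =
      ((c, pvBody ls) :: pvChunks (pvAfter ls)).foldl pvExtract st := by
  induction ls with
  | nil => intro c st; simp [pvBody, pvAfter, pvChunks, pv_extract_nil]
  | cons l ls ih =>
    intro c st
    by_cases h1 : PySem.Str.startswith (PySem.Str.lower l) "domain profile" = true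
    · have hp : pvProfOf l = some "Domain" := by
        simp only [pvProfOf]; rw [if_pos h1]
      have hs : pvStep' (some c, st) l = (some "Domain", st) := by
        simp only [pvStep']; rw [if_pos h1]
      simp only [List.foldl_cons, hs, ih, pvBody, pvAfter, hp, List.foldl_cons,
        pv_extract_nil, pv_chunks_cons_hdr l ls "Domain" hp]
    · by_cases h2 : PySem.Str.startswith (PySem.Str.lower l) "private profile" = true
      · have hp : pvProfOf l = some "Private" := by
          simp only [pvProfOf]; rw [if_neg h1, if_pos h2]
        have hs : pvStep' (some c, st) l = (some "Private", st) := by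
          simp only [pvStep']; rw [if_neg h1, if_pos h2]
        simp only [List.foldl_cons, hs, ih, pvBody, pvAfter, hp, List.foldl_cons,
          pv_extract_nil, pv_chunks_cons_hdr l ls "Private" hp]
      · by_cases h3 : PySem.Str.startswith (PySem.Str.lower l) "public profile" = true
        · have hp : pvProfOf l = some "Public" := by
            simp only [pvProfOf]; rw [if_neg h1, if_neg h2, if_pos h3]
          have hs : pvStep' (some c, st) l = (some "Public", st) := by
            simp only [pvStep']; rw [if_neg h1, if_neg h2, if_pos h3]
          simp only [List.foldl_cons, hs, ih, pvBody, pvAfter, hp, List.foldl_cons,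
            pv_extract_nil, pv_chunks_cons_hdr l ls "Public" hp]
        · have hp : pvProfOf l = none := by
            simp only [pvProfOf]; rw [if_neg h1, if_neg h2, if_neg h3]
          by_cases h4 : PySem.Str.startswith l "State" = true
          · have hpe : (PySem.Str.split₀ l).isEmpty ≠ true := by
              rw [pv_split_ne_nil _ h4]; simp
            have hs : pvStep' (some c, st) l =
                (some c, st.insert c (PySem.Str.upper (PySem.List.pyGetD (PySem.Str.split₀ l) (-1) ""))) := by
              simp only [pvStep']
              rw [if_neg h1, if_neg h2, if_neg h3, if_pos h4]
              simp only [if_neg hpe]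
            simp only [List.foldl_cons, hs, ih, pvBody, pvAfter, hp, List.foldl_cons,
              pv_extract_state st c l (pvBody ls) h4]
          · have hs : pvStep' (some c, st) l = (some c, st) := by
              simp only [pvStep']
              rw [if_neg h1, if_neg h2, if_neg h3, if_neg h4]
            simp only [List.foldl_cons, hs, ih, pvBody, pvAfter, hp, List.foldl_cons,
              pv_extract_skip st c l (pvBody ls) (by simpa using h4)]

-- main invariant, before any header
lemma pv_main0 (ls : List String) : ∀ (st : PySem.Dict String String),
    (ls.foldl pvStep' (none, st)).2 = (pvChunks ls).foldl pvExtract st := by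
  induction ls with
  | nil => intro st; simp [pvChunks]
  | cons l ls ih =>
    intro st
    by_cases h1 : PySem.Str.startswith (PySem.Str.lower l) "domain profile" = true
    · have hp : pvProfOf l = some "Domain" := by
        simp only [pvProfOf]; rw [if_pos h1]
      have hs : pvStep' (none, st) l = (some "Domain", st) := by
        simp only [pvStep']; rw [if_pos h1]
      rw [List.foldl_cons, hs, pv_main1, pv_chunks_cons_hdr l ls _ hp]
    · by_cases h2 : PySem.Str.startswith (PySem.Str.lower l) "private profile" = true
      · have hp : pvProfOf l = some "Private" := by
          simp only [pvProfOf]; rw [if_neg h1, if_pos h2]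
        have hs : pvStep' (none, st) l = (some "Private", st) := by
          simp only [pvStep']; rw [if_neg h1, if_pos h2]
        rw [List.foldl_cons, hs, pv_main1, pv_chunks_cons_hdr l ls _ hp]
      · by_cases h3 : PySem.Str.startswith (PySem.Str.lower l) "public profile" = true
        · have hp : pvProfOf l = some "Public" := by
            simp only [pvProfOf]; rw [if_neg h1, if_neg h2, if_pos h3]
          have hs : pvStep' (none, st) l = (some "Public", st) := by
            simp only [pvStep']; rw [if_neg h1, if_neg h2, if_pos h3]
          rw [List.foldl_cons, hs, pv_main1, pv_chunks_cons_hdr l ls _ hp]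
        · have hp : pvProfOf l = none := by
            simp only [pvProfOf]; rw [if_neg h1, if_neg h2, if_neg h3]
          have hs : pvStep' (none, st) l = (none, st) := by
            simp only [pvStep']
            rw [if_neg h1, if_neg h2, if_neg h3]
            by_cases h4 : PySem.Str.startswith l "State" = true
            · rw [if_pos h4]
            · rw [if_neg h4]
          rw [List.foldl_cons, hs, ih, pv_chunks_cons_nohdr l ls hp]

-- ===== VERDICT (by name: the statement is the Claim_ definition above) =====
theorem parse_allprofiles_py_spec : Claim_equal_parse_allprofiles_py := by
  intro output _
  unfold Spec_parse_allprofiles_py parse_allprofiles_py parse_allprofiles_py_alt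
  rw [pv_foldA_filter, pv_main0]
  rfl
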